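-- pv_equiv track=rewrite | github.com/SevereLyric4968/Chester | core/robot_manipulator.py | init_storage_occupancy
-- ===== SOURCE A (Python) =====
-- def init_storage_occupancy(storageMap,mode="standard"):
--     # True = Occupied
--     # False = Free
--     standardCounts={
--         'P': 8, 'p' : 8,
--         'R': 2, 'r' : 2,
--         'N': 2, 'n' : 2,
--         'B': 2, 'b' : 2,
--         'Q': 1, 'q' : 1,
--         'K': 1, 'k' : 1
--     }
--     #todo read board and manually count instead of hard code
--
--     storageOccupancy={}
--     for pieceType in storageMap:
--         storageOccupancy[pieceType]=[]
--         totalSlots = len(storageMap[pieceType])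
--         onBoard=standardCounts[pieceType]
--         for i in range(totalSlots):
--             if mode=="standard":
--                 storageOccupancy[pieceType].append(i>onBoard)
--             else:
--                 storageOccupancy[pieceType].append(True)
--     return storageOccupancy
-- ===== SOURCE B (Python) =====
-- def _occupancy_row(on_board, total, mode):
--     if mode != "standard":
--         return [True] * total
--     free = min(on_board + 1, total)
--     return [False] * free + [True] * (total - free)
--
-- def init_storage_occupancy(storageMap, mode="standard"):
--     standardCounts = {
--         'P': 8, 'p': 8,
--         'R': 2, 'r': 2,
--         'N': 2, 'n': 2,
--         'B': 2, 'b': 2,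
--         'Q': 1, 'q': 1,
--         'K': 1, 'k': 1
--     }
--     return {k: _occupancy_row(standardCounts[k], len(storageMap[k]), mode)
--             for k in storageMap}
-- ===== Notes on version B (the rewrite author's own statement) =====
-- stated objective: simpler
-- what changed: Replaces A's mutate-a-dict-with-nested-append-loop with a single dict comprehension mapping each key to a closed-form block list (a False block of length min(count+1,total) followed by a True block) built by a small helper, eliminating both the per-slot inner loop and the incremental dict construction.
import Mathlib
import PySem

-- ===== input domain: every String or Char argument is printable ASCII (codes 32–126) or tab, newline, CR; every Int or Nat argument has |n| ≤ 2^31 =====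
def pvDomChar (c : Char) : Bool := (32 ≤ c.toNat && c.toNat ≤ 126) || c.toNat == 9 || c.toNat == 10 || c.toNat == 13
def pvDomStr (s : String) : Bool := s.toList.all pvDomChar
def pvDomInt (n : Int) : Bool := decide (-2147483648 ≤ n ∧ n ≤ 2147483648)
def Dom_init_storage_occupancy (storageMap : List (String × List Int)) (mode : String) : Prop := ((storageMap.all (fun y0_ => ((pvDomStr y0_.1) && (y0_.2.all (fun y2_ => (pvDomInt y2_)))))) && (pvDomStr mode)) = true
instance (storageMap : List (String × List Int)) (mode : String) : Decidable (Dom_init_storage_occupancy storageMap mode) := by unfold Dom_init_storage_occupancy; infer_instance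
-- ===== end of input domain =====

-- B replaces A's mutate-a-dict-with-nested-append-loop by one map over the keys, each list
-- built in closed form by a helper; equivalence is about the returned dict (no mutation).

-- ===== PORT A =====
-- the hard-coded standardCounts dict, written verbatim in both Pythons
def pvStdCounts : PySem.Dict String Int :=
  PySem.Dict.ofList [("P",8),("p",8),("R",2),("r",2),("N",2),("n",2),
                     ("B",2),("b",2),("Q",1),("q",1),("K",1),("k",1)]

def init_storage_occupancy (storageMap : List (String × List Int)) (mode : String) : List (String × List Bool) :=
  (storageMap.foldl (fun (acc : PySem.Dict String (List Bool)) kv =>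
      let acc := acc.insert kv.1 []                     -- storageOccupancy[pieceType] = []
      let totalSlots : Int := kv.2.length               -- len(storageMap[pieceType])
      let onBoard : Int := PySem.Dict.getD pvStdCounts kv.1 0   -- standardCounts[pieceType]; Pre_ guarantees presence
      acc.insert kv.1
        ((PySem.List.pyRange 0 totalSlots 1).foldl      -- for i in range(totalSlots): .append(…)
          (fun l i => l ++ [if mode == "standard" then decide (i > onBoard) else true]) []))
    PySem.Dict.empty).items

-- ===== PORT B =====
def occupancyRow (onBoard total : Int) (mode : String) : List Bool :=
  if mode != "standard" then List.replicate total.toNat true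
  else
    let free := min (onBoard + 1) total
    List.replicate free.toNat false ++ List.replicate (total - free).toNat true

def init_storage_occupancy_alt (storageMap : List (String × List Int)) (mode : String) : List (String × List Bool) :=
  storageMap.map (fun kv =>
    (kv.1, occupancyRow (PySem.Dict.getD pvStdCounts kv.1 0) kv.2.length mode))

-- ===== PRECONDITION & SPEC =====
-- Pre_ excludes keys outside the 12 piece letters (standardCounts[pieceType] raises KeyError) and
-- association lists with duplicate keys, which no Python dict argument can represent.
def Pre_init_storage_occupancy (storageMap : List (String × List Int)) (mode : String) : Prop :=
  (storageMap.map Prod.fst).Nodup ∧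
  ∀ kv ∈ storageMap, kv.1 ∈ ["P","p","R","r","N","n","B","b","Q","q","K","k"]
instance (storageMap : List (String × List Int)) (mode : String) : Decidable (Pre_init_storage_occupancy storageMap mode) := by unfold Pre_init_storage_occupancy; infer_instance

def pvWitness_init_storage_occupancy : (List (String × List Int)) × String :=
  ([("P", [0, 1, 2]), ("q", [5])], "standard")

def Spec_init_storage_occupancy (storageMap : List (String × List Int)) (mode : String) (out : List (String × List Bool)) : Prop := out = init_storage_occupancy_alt storageMap mode
instance (storageMap : List (String × List Int)) (mode : String) (out : List (String × List Bool)) : Decidable (Spec_init_storage_occupancy storageMap mode out) := by unfold Spec_init_storage_occupancy; infer_instance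

-- ===== CLAIM (what is proved, stated in full; the proofs are below) =====
def Claim_equal_init_storage_occupancy : Prop := ∀ (storageMap : List (String × List Int)) (mode : String), Dom_init_storage_occupancy storageMap mode → Pre_init_storage_occupancy storageMap mode → Spec_init_storage_occupancy storageMap mode (init_storage_occupancy storageMap mode)

-- ===== LEMMAS AND PROOFS =====

-- appending f i per element is mapping
theorem pv_foldl_append_singleton {α β : Type} (f : α → β) :
    ∀ (xs : List α) (init : List β),
      xs.foldl (fun l i => l ++ [f i]) init = init ++ xs.map f := by
  intro xs
  induction xs with
  | nil => simp
  | cons x xs ih => intro init; simp [ih]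

-- mapping (· > ob) over range(t) is a block of Falses then a block of Trues
theorem pv_map_gt_blocks (ob : Int) (hob : 0 ≤ ob) :
    ∀ t : Nat,
      (PySem.List.pyRange 0 (t : Int) 1).map (fun i => decide (i > ob)) =
        List.replicate (min (ob + 1) (t : Int)).toNat false ++
          List.replicate ((t : Int) - min (ob + 1) (t : Int)).toNat true := by
  intro t
  induction t with
  | zero =>
    rw [PySem.List.pyRange_one_eq_nil (by omega)]
    have h1 : (min (ob + 1) ((0 : Nat) : Int)).toNat = 0 := by omega
    have h2 : (((0 : Nat) : Int) - min (ob + 1) ((0 : Nat) : Int)).toNat = 0 := by omega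
    rw [h1, h2]; simp
  | succ t ih =>
    have hc : (((t + 1 : Nat)) : Int) = (t : Int) + 1 := by push_cast; ring
    rw [hc, PySem.List.pyRange_one_succ_right (by omega), List.map_append, ih]
    by_cases h : (t : Int) + 1 ≤ ob + 1
    · have hd : decide ((t : Int) > ob) = false := by simp; omega
      have m1 : min (ob + 1) ((t : Nat) : Int) = (t : Nat) := by omega
      have e1 : ((t : Int) - min (ob + 1) (t : Int)).toNat = 0 := by omega
      have m2 : min (ob + 1) ((t : Int) + 1) = (t : Int) + 1 := by omega
      have e2 : (((t : Int) + 1) - min (ob + 1) ((t : Int) + 1)).toNat = 0 := by omega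
      have e3 : ((t : Int) + 1).toNat = t + 1 := by omega
      simp only [List.map, hd, m1, m2, e3]
      rw [Int.toNat_natCast, List.replicate_succ' (n := t)]
      simp
    · have hd : decide ((t : Int) > ob) = true := by simp; omega
      have m1 : min (ob + 1) ((t : Nat) : Int) = ob + 1 := by omega
      have m2 : min (ob + 1) ((t : Int) + 1) = ob + 1 := by omega
      have e2 : (((t : Int) + 1) - (ob + 1)).toNat = ((t : Int) - (ob + 1)).toNat + 1 := by omega
      simp only [List.map, hd, m1, m2, e2]
      rw [List.replicate_succ' (n := ((t : Int) - (ob + 1)).toNat)]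
      simp

-- every lookup in the hard-coded counts dict (with default 0) is nonnegative
theorem pv_stdCounts_nonneg (k : String) : 0 ≤ PySem.Dict.getD pvStdCounts k 0 := by
  rw [PySem.Dict.getD_eq_get?_getD]
  cases h : PySem.Dict.get? pvStdCounts k with
  | none => simp
  | some v =>
    have hm := PySem.Dict.mem_items_of_get?_eq_some pvStdCounts h
    have hit : pvStdCounts.items = [("P",8),("p",8),("R",2),("r",2),("N",2),("n",2),
        ("B",2),("b",2),("Q",1),("q",1),("K",1),("k",1)] := by decide
    rw [hit] at hm
    simp only [List.mem_cons, List.not_mem_nil, or_false, Prod.mk.injEq] at hm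
    rcases hm with ⟨-, rfl⟩ | ⟨-, rfl⟩ | ⟨-, rfl⟩ | ⟨-, rfl⟩ | ⟨-, rfl⟩ | ⟨-, rfl⟩ |
      ⟨-, rfl⟩ | ⟨-, rfl⟩ | ⟨-, rfl⟩ | ⟨-, rfl⟩ | ⟨-, rfl⟩ | ⟨-, rfl⟩ <;> simp

-- A's inner append loop produces exactly B's closed-form row
theorem pv_inner_eq (mode : String) (ob : Int) (hob : 0 ≤ ob) (t : Nat) :
    (PySem.List.pyRange 0 (t : Int) 1).foldl
        (fun l i => l ++ [if mode == "standard" then decide (i > ob) else true]) [] =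
      occupancyRow ob (t : Int) mode := by
  rw [pv_foldl_append_singleton]
  unfold occupancyRow
  by_cases h : mode == "standard"
  · simp only [h, if_true, List.nil_append]
    rw [show (mode != "standard") = false by simp [bne, h], if_neg (by simp)]
    exact pv_map_gt_blocks ob hob t
  · rw [show (mode != "standard") = true by simp [bne, h], if_pos rfl]
    simp only [h, if_false, Bool.false_eq_true, List.nil_append]
    rw [List.map_const']
    have : (PySem.List.pyRange 0 (t : Int) 1).length = ((t : Int)).toNat := by
      rw [PySem.List.length_pyRange_one]; omega
    rw [this]

-- ===== VERDICT (by name: the statement is the Claim_ definition above) =====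
theorem init_storage_occupancy_spec : Claim_equal_init_storage_occupancy := by
  intro storageMap mode _ hpre
  unfold Spec_init_storage_occupancy init_storage_occupancy init_storage_occupancy_alt
  simp only [PySem.Dict.insert_insert_self]
  rw [PySem.Dict.items_foldl_insert_fresh storageMap Prod.fst
        (fun kv => (PySem.List.pyRange 0 (kv.2.length : Int) 1).foldl
          (fun l i => l ++ [if mode == "standard"
            then decide (i > PySem.Dict.getD pvStdCounts kv.1 0) else true]) [])
        PySem.Dict.empty (fun kv _ => PySem.Dict.contains_empty _) hpre.1]
  simp only [PySem.Dict.empty, List.nil_append]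
  apply List.map_congr_left
  intro kv _
  rw [pv_inner_eq mode _ (pv_stdCounts_nonneg kv.1) kv.2.length]
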